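-- pv_equiv track=rewrite | github.com/Inaba-Kenji/algorithm | Quiz/test_remove_less_frequent_values.py | remove_less_frequent_values
-- ===== SOURCE A (Python) =====
-- from collections import Counter
-- from typing import List
--
-- def remove_less_frequent_values(x: List[int], y: List[int]):
--     counter_x = Counter(x)
--     counter_y = Counter(y)
--
--     for key_x, value_x in counter_x.items():
--         value_y = counter_y.get(key_x)
--         if value_y:
--             if value_x < value_y:
--                 x = [i for i in x if i != key_x]
--             elif value_x > value_y:
--                 y = [i for i in y if i != key_x]
--     return x, y
-- ===== SOURCE B (Python) =====
-- from collections import Counter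
--
-- def remove_less_frequent_values(x, y):
--     cx = Counter(x)
--     cy = Counter(y)
--     return ([i for i in x if cx[i] >= cy[i]],
--             [i for i in y if cy[i] >= cx[i]])
-- ===== Notes on version B (the rewrite author's own statement) =====
-- stated objective: alternative
-- what changed: Replaces the per-distinct-key loop that conditionally rebuilds x or y once per key with two direct filter passes keeping each element whose own-list count is not smaller than the other list's count.
import Mathlib
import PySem

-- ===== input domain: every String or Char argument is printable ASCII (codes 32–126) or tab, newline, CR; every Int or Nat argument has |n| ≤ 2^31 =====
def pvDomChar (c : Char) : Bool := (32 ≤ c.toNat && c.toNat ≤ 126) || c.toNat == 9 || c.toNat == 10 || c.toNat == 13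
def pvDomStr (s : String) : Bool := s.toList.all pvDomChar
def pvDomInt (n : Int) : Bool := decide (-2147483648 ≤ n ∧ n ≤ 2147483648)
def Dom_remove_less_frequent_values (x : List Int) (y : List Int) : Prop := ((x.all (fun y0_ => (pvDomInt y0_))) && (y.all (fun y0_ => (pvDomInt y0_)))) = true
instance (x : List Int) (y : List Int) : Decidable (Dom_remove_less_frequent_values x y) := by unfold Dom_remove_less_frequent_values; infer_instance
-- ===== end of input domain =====

-- B replaces A's per-distinct-key loop that rebuilds whole lists with one count-comparison filter pass over each list (objective: alternative).

-- ===== PORT A =====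
-- Counter(x), Counter(y); for key_x, value_x in counter_x.items(): look up counter_y, conditionally rebuild x or y
def remove_less_frequent_values (x : List Int) (y : List Int) : List Int × List Int :=
  let counter_x := PySem.Dict.counter x
  let counter_y := PySem.Dict.counter y
  counter_x.items.foldl (fun (s : List Int × List Int) kv =>
    let key_x := kv.1
    let value_x := kv.2
    match counter_y.get? key_x with
    | none => s
    | some value_y =>
      if value_y ≠ 0 then            -- Python truthiness of value_y
        if value_x < value_y then (s.1.filter (fun i => i ≠ key_x), s.2)
        else if value_x > value_y then (s.1, s.2.filter (fun i => i ≠ key_x))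
        else s
      else s) (x, y)

-- ===== PORT B =====
def remove_less_frequent_values_alt (x : List Int) (y : List Int) : List Int × List Int :=
  let cx := PySem.Dict.counter x
  let cy := PySem.Dict.counter y
  (x.filter (fun i => cx.getD i 0 ≥ cy.getD i 0),
   y.filter (fun i => cy.getD i 0 ≥ cx.getD i 0))

-- ===== PRECONDITION & SPEC =====
def Spec_remove_less_frequent_values (x : List Int) (y : List Int) (out : List Int × List Int) : Prop := out = remove_less_frequent_values_alt x y
instance (x : List Int) (y : List Int) (out : List Int × List Int) : Decidable (Spec_remove_less_frequent_values x y out) := by unfold Spec_remove_less_frequent_values; infer_instance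

-- ===== CLAIM (what is proved, stated in full; the proofs are below) =====
def Claim_equal_remove_less_frequent_values : Prop := ∀ (x : List Int) (y : List Int), Dom_remove_less_frequent_values x y → Spec_remove_less_frequent_values x y (remove_less_frequent_values x y)

-- ===== LEMMAS AND PROOFS =====

lemma get?_counter_of_mem (y : List Int) (k : Int) (h : k ∈ y) :
    (PySem.Dict.counter y).get? k = some ((y.count k : Int)) := by
  have hc : (PySem.Dict.counter y).contains k = true := by
    rw [PySem.Dict.contains_counter]; simpa using h
  cases hg : (PySem.Dict.counter y).get? k with
  | none => rw [PySem.Dict.get?_eq_none_iff_contains] at hg; simp [hg] at hc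
  | some v =>
    have := PySem.Dict.getD_eq_get?_getD (PySem.Dict.counter y) k 0
    rw [PySem.Dict.getD_counter, hg] at this
    simp at this
    rw [this]

lemma get?_counter_of_not_mem (y : List Int) (k : Int) (h : k ∉ y) :
    (PySem.Dict.counter y).get? k = none := by
  rw [PySem.Dict.get?_eq_none_iff_contains, PySem.Dict.contains_counter]
  simpa using h

-- one iteration of A's loop, in closed form: filter x by (≠ k) iff count_x k < count_y k, y dually
lemma step_eq (x y : List Int) (k : Int) (s : List Int × List Int) :
    (match (PySem.Dict.counter y).get? k with
      | none => s
      | some value_y =>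
        if value_y ≠ 0 then
          if (x.count k : Int) < value_y then (s.1.filter (fun i => i ≠ k), s.2)
          else if (x.count k : Int) > value_y then (s.1, s.2.filter (fun i => i ≠ k))
          else s
        else s)
    = ((if x.count k < y.count k then s.1.filter (fun i => i ≠ k) else s.1),
       (if k ∈ y ∧ y.count k < x.count k then s.2.filter (fun i => i ≠ k) else s.2)) := by
  by_cases h : k ∈ y
  · rw [get?_counter_of_mem y k h]
    have hpos : 0 < y.count k := List.count_pos_iff.mpr h
    simp only []
    have hne : ((y.count k : Int) ≠ 0) := by positivity
    rw [if_pos hne]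
    by_cases h1 : x.count k < y.count k
    · rw [if_pos (by exact_mod_cast h1), if_pos h1, if_neg (by simp [h, Nat.not_lt.mpr (le_of_lt h1)])]
    · rw [if_neg (by exact_mod_cast h1), if_neg h1]
      by_cases h2 : y.count k < x.count k
      · rw [if_pos (by exact_mod_cast h2), if_pos ⟨h, h2⟩]
      · rw [if_neg (by exact_mod_cast h2), if_neg (by simp [h2])]
  · rw [get?_counter_of_not_mem y k h]
    have h0 : y.count k = 0 := List.count_eq_zero.mpr h
    simp [h0, h]

-- A's whole loop over a list of keys ks = two filters, with membership in ks as a guard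
lemma fold_eq (x y : List Int) (ks : List Int) : ∀ (a b : List Int),
    (ks.map (fun k => (k, (x.count k : Int)))).foldl (fun (s : List Int × List Int) kv =>
      match (PySem.Dict.counter y).get? kv.1 with
      | none => s
      | some value_y =>
        if value_y ≠ 0 then
          if kv.2 < value_y then (s.1.filter (fun i => i ≠ kv.1), s.2)
          else if kv.2 > value_y then (s.1, s.2.filter (fun i => i ≠ kv.1))
          else s
        else s) (a, b)
    = (a.filter (fun i => !(decide (i ∈ ks) && decide (x.count i < y.count i))),
       b.filter (fun i => !(decide (i ∈ ks) && decide (i ∈ y ∧ y.count i < x.count i)))) := by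
  induction ks with
  | nil => intro a b; simp
  | cons k ks ih =>
    intro a b
    simp only [List.map_cons, List.foldl_cons]
    rw [step_eq x y k (a, b)]
    rw [ih]
    simp only [Prod.mk.injEq]; refine ⟨?_, ?_⟩
    · by_cases hr : x.count k < y.count k
      · rw [if_pos hr, List.filter_filter]
        apply List.filter_congr
        intro i _
        by_cases hik : i = k <;> simp [hik, hr]
      · rw [if_neg hr]
        apply List.filter_congr
        intro i _
        by_cases hik : i = k <;> simp [hik, hr]
    · by_cases hr : k ∈ y ∧ y.count k < x.count k
      · rw [if_pos hr, List.filter_filter]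
        apply List.filter_congr
        intro i _
        by_cases hik : i = k <;> simp [hik, hr]
      · rw [if_neg hr]
        apply List.filter_congr
        intro i _
        by_cases hik : i = k <;> simp [hik, hr]

theorem ports_agree (x y : List Int) :
    remove_less_frequent_values x y = remove_less_frequent_values_alt x y := by
  unfold remove_less_frequent_values remove_less_frequent_values_alt
  simp only [PySem.Dict.items_counter]
  rw [fold_eq x y (PySem.Set.ofList x) x y]
  simp only [Prod.mk.injEq]; refine ⟨?_, ?_⟩
  · apply List.filter_congr
    intro i hi
    have hx : i ∈ PySem.Set.ofList x := (PySem.Set.mem_ofList x i).mpr hi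
    have hcx : 0 < x.count i := List.count_pos_iff.mpr hi
    simp [hx, PySem.Dict.getD_counter]
    by_cases h : x.count i < y.count i <;> simp [h] <;> omega
  · apply List.filter_congr
    intro i hi
    have hcy : 0 < y.count i := List.count_pos_iff.mpr hi
    simp [PySem.Dict.getD_counter, PySem.Set.mem_ofList, hi]
    by_cases hx : i ∈ x
    · by_cases h : y.count i < x.count i <;> simp [hx, h] <;> omega
    · have h0 : x.count i = 0 := List.count_eq_zero.mpr hx
      simp [hx, h0]

-- ===== VERDICT (by name: the statement is the Claim_ definition above) =====
theorem remove_less_frequent_values_spec : Claim_equal_remove_less_frequent_values := by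
  intro x y _
  unfold Spec_remove_less_frequent_values
  exact ports_agree x y
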